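-- pv_equiv track=rewrite | github.com/Andrew-A-A/Content_Filter_Extension_Backend | TextPreprocessor.py | remove_redundant_characters_in_row
-- ===== SOURCE A (Python) =====
-- def remove_redundant_characters_in_row(row):
--     if isinstance(row, str):
--         words = row.split()
--         cleaned_words = []
--         for word in words:
--             cleaned_word = ""
--             prev_char = None
--             count = 0
--
--             for char in word:
--                 if char == prev_char:
--                     count += 1
--                     if count <= 2:
--                         cleaned_word += char
--                 else:
--                     cleaned_word += char
--                     count = 1
--                 prev_char = char
--
--             cleaned_words.append(cleaned_word)
--
--         return " ".join(cleaned_words)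
-- ===== SOURCE B (Python) =====
-- def _collapse(word):
--     # keep each char unless the two preceding chars (in the padded shifts) equal it
--     prevs = [None, None] + list(word)
--     return "".join(c for c, p2, p1 in zip(word, prevs, prevs[1:]) if not (p1 == p2 == c))
--
--
-- def remove_redundant_characters_in_row(row):
--     if isinstance(row, str):
--         return " ".join(_collapse(w) for w in row.split())
-- ===== Notes on version B (the rewrite author's own statement) =====
-- stated objective: idiomatic
-- what changed: Replaced the per-character prev_char/count state-machine loop by a stateless filter of each word zipped with its two None-padded shifted copies (keep a char unless both preceding chars equal it).
import Mathlib
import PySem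

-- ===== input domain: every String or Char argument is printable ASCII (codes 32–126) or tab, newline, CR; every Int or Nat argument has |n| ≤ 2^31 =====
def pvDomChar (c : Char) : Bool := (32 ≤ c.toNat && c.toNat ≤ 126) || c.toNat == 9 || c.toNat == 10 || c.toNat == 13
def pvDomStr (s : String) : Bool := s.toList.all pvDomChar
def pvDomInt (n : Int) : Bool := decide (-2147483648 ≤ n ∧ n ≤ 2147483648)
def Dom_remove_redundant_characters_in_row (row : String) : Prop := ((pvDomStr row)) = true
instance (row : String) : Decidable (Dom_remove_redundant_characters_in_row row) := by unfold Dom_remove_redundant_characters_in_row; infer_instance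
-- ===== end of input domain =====

-- B replaces A's per-character prev_char/count state machine by a stateless filter of each
-- word zipped with its two shifted copies (objective: idiomatic). The non-string → None path
-- of the Python falls outside the String → String signature and is not modelled.

-- ===== PORT A =====
-- one step of A's inner character loop: state = (cleaned_word, prev_char, count)
def pvStepA (st : List Char × Option Char × Int) (char : Char) : List Char × Option Char × Int :=
  let (cleaned, prev, count) := st
  if some char = prev then
    let count := count + 1
    (if count ≤ 2 then cleaned ++ [char] else cleaned, some char, count)
  else
    (cleaned ++ [char], some char, (1 : Int))

def pvWordA (word : List Char) : List Char :=
  (word.foldl pvStepA ([], none, (0 : Int))).1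

def remove_redundant_characters_in_row (row : String) : String :=
  let words := PySem.Str.split₀ row
  let cleaned_words := words.foldl (fun acc w => acc ++ [String.ofList (pvWordA w.toList)]) []
  PySem.Str.join " " cleaned_words

-- ===== PORT B =====
-- zip the word with its two shifted (None-padded) copies; keep c unless p1 == p2 == c
def pvWordB (word : List Char) : List Char :=
  let prevs : List (Option Char) := none :: none :: word.map some
  ((word.zip (prevs.zip prevs.tail)).filter
      (fun p => !(p.2.2 == p.2.1 && p.2.1 == some p.1))).map (·.1)

def remove_redundant_characters_in_row_alt (row : String) : String :=
  PySem.Str.join " " ((PySem.Str.split₀ row).map (fun w => String.ofList (pvWordB w.toList)))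

-- ===== PRECONDITION & SPEC =====
def Spec_remove_redundant_characters_in_row (row : String) (out : String) : Prop := out = remove_redundant_characters_in_row_alt row
instance (row : String) (out : String) : Decidable (Spec_remove_redundant_characters_in_row row out) := by unfold Spec_remove_redundant_characters_in_row; infer_instance

-- ===== CLAIM (what is proved, stated in full; the proofs are below) =====
def Claim_equal_remove_redundant_characters_in_row : Prop := ∀ (row : String), Dom_remove_redundant_characters_in_row row → Spec_remove_redundant_characters_in_row row (remove_redundant_characters_in_row row)

-- ===== LEMMAS AND PROOFS =====

-- common characterisation: scan with the two previous characters (p2 = two back, p1 = one back)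
def pvRun : Option Char → Option Char → List Char → List Char
  | _, _, [] => []
  | p2, p1, c :: rest => (if p1 = some c ∧ p2 = some c then [] else [c]) ++ pvRun p1 (some c) rest

lemma pvWordB_go (l : List Char) : ∀ (a b : Option Char),
    ((l.zip ((a :: b :: l.map some).zip (b :: l.map some))).filter
        (fun p => !(p.2.2 == p.2.1 && p.2.1 == some p.1))).map (·.1) = pvRun a b l := by
  induction l with
  | nil => intro a b; rfl
  | cons c rest ih =>
    intro a b
    have hh := ih b (some c)
    simp only [List.map_cons, List.zip_cons_cons, List.filter_cons, pvRun] at hh ⊢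
    by_cases h : b = some c ∧ a = some c
    · have hb : (b == a && a == some c) = true := by simp [h.1, h.2]
      rw [hb]
      simp only [Bool.not_true, Bool.false_eq_true, if_false, if_pos h, List.nil_append]
      exact hh
    · have hb : (b == a && a == some c) = false := by
        rcases Decidable.em (a = some c) with ha | ha
        · rcases Decidable.em (b = a) with hba | hba
          · exact absurd ⟨hba.trans ha, ha⟩ h
          · simp [hba]
        · simp [ha]
      rw [hb]
      simp only [Bool.not_false, if_true, List.map_cons, if_neg h, List.singleton_append]
      exact congrArg (c :: ·) hh

lemma pvWordB_eq (l : List Char) : pvWordB l = pvRun none none l := by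
  have := pvWordB_go l none none
  simpa [pvWordB] using this

lemma pvWordA_go (l : List Char) : ∀ (acc : List Char) (p1 p2 : Option Char) (count : Int),
    (p1 ≠ none → 1 ≤ count) → (2 ≤ count ↔ (p1 ≠ none ∧ p1 = p2)) →
    (l.foldl pvStepA (acc, p1, count)).1 = acc ++ pvRun p2 p1 l := by
  induction l with
  | nil => intro acc p1 p2 count _ _; simp [pvRun]
  | cons c rest ih =>
    intro acc p1 p2 count h1 h2
    simp only [List.foldl_cons, pvStepA, pvRun]
    by_cases hp : some c = p1
    · -- repeated character
      have hne : p1 ≠ none := by simp [← hp]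
      have hc1 : 1 ≤ count := h1 hne
      simp only [if_pos hp]
      by_cases hk : count + 1 ≤ 2
      · -- kept: count was ≤ 1, so p1 ≠ p2 by the invariant ⇒ p2 ≠ some c
        have hnot2 : ¬ 2 ≤ count := by omega
        have hne2 : ¬ (p1 = some c ∧ p2 = some c) := by
          rintro ⟨hA, hB⟩
          exact hnot2 (h2.mpr ⟨hne, by rw [hA, hB]⟩)
        rw [if_pos hk, if_neg hne2,
          ih (acc ++ [c]) (some c) p1 (count + 1) (by intro _; omega)
            (by constructor
                · intro _; exact ⟨by simp, hp⟩
                · intro _; omega)]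
        simp
      · -- dropped: count ≥ 2, so p1 = p2 = some c
        have h2c : 2 ≤ count := by omega
        obtain ⟨_, heq⟩ := h2.mp h2c
        have hyes : p1 = some c ∧ p2 = some c := ⟨hp.symm, by rw [← heq, ← hp]⟩
        rw [if_neg hk, if_pos hyes,
          ih acc (some c) p1 (count + 1) (by intro _; omega)
            (by constructor
                · intro _; exact ⟨by simp, hp⟩
                · intro _; omega)]
        simp
    · -- new character
      have hne2 : ¬ (p1 = some c ∧ p2 = some c) := fun h => hp h.1.symm
      rw [if_neg hp, if_neg hne2,
        ih (acc ++ [c]) (some c) p1 1 (by intro _; omega)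
          (by constructor
              · omega
              · rintro ⟨_, heq⟩; exact absurd heq hp)]
      simp

lemma pvWordA_eq_pvWordB (l : List Char) : pvWordA l = pvWordB l := by
  rw [pvWordB_eq, pvWordA]
  have := pvWordA_go l [] none none 0 (by simp) (by simp)
  simpa using this

lemma foldl_append_map (f : String → String) (l : List String) :
    ∀ acc : List String, l.foldl (fun a w => a ++ [f w]) acc = acc ++ l.map f := by
  induction l with
  | nil => intro acc; simp
  | cons w rest ih => intro acc; simp [ih]

-- ===== VERDICT (by name: the statement is the Claim_ definition above) =====
theorem remove_redundant_characters_in_row_spec : Claim_equal_remove_redundant_characters_in_row := by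
  intro row _
  unfold Spec_remove_redundant_characters_in_row
  unfold remove_redundant_characters_in_row remove_redundant_characters_in_row_alt
  simp only [foldl_append_map, pvWordA_eq_pvWordB, List.nil_append]
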